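-- pv_equiv track=rewrite | github.com/daogeshifu/site-geo | app/utils/schema_extractor.py | _normalize_type_name
-- ===== SOURCE A (Python) =====
-- def _normalize_type_name(raw_type: str) -> str:
--     """将 @type 统一归一化为短类型名，兼容完整 URL 和命名空间写法。"""
--     value = raw_type.strip()
--     if not value:
--         return ""
--     for separator in ("/", "#", ":"):
--         if separator in value:
--             value = value.rsplit(separator, 1)[-1]
--     return value.strip()
-- ===== SOURCE B (Python) =====
-- def _normalize_type_name(raw_type: str) -> str:
--     value = raw_type.strip()
--     tail = []
--     for ch in reversed(value):
--         if ch in "/#:":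
--             break
--         tail.append(ch)
--     return "".join(reversed(tail)).strip()
-- ===== Notes on version B (the rewrite author's own statement) =====
-- stated objective: alternative
-- what changed: Replaces the three sequential rsplit passes (one per separator) with a single reverse scan that collects the suffix up to the first separator seen from the right.
import Mathlib
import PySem

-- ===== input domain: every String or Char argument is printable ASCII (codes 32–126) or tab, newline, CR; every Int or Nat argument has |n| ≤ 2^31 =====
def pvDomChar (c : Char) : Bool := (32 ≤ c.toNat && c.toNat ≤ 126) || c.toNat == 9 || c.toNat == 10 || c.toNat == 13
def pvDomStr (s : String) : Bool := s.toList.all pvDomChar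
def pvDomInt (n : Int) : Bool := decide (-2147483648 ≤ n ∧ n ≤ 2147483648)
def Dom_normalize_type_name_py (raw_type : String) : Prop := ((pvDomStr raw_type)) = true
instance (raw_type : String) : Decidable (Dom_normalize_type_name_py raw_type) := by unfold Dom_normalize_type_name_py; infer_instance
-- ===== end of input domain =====

-- B replaces A's three sequential rsplit passes with one reverse scan up to the first
-- separator from the right; same output on every input (objective: alternative).

-- ===== PORT A =====
-- value.rsplit(c, 1)[-1] for a single-char separator c: the suffix after the LAST
-- occurrence of c (exact when c occurs in cs; A only calls it under that guard).
def pvRsplitLast (cs : List Char) (c : Char) : List Char :=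
  (cs.reverse.takeWhile (fun x => x ≠ c)).reverse

def normalize_type_name_py (raw_type : String) : String :=
  let value := PySem.Str.strip raw_type
  if value = "" then ""
  else
    -- for separator in ("/", "#", ":"): if separator in value: value = rsplit(...)
    let cs := ['/', '#', ':'].foldl
      (fun v sep => if PySem.Chars.isIn [sep] v then pvRsplitLast v sep else v)
      value.toList
    PySem.Str.strip (String.ofList cs)

-- ===== PORT B =====
def normalize_type_name_py_alt (raw_type : String) : String :=
  let value := PySem.Str.strip raw_type
  -- for ch in reversed(value): break on a separator, else collect (= takeWhile on the reverse)
  let tail := value.toList.reverse.takeWhile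
    (fun ch => !(PySem.Chars.isIn [ch] ['/', '#', ':']))
  PySem.Str.strip (String.ofList tail.reverse)

-- ===== PRECONDITION & SPEC =====
def Spec_normalize_type_name_py (raw_type : String) (out : String) : Prop := out = normalize_type_name_py_alt raw_type
instance (raw_type : String) (out : String) : Decidable (Spec_normalize_type_name_py raw_type out) := by unfold Spec_normalize_type_name_py; infer_instance

-- ===== CLAIM (what is proved, stated in full; the proofs are below) =====
def Claim_equal_normalize_type_name_py : Prop := ∀ (raw_type : String), Dom_normalize_type_name_py raw_type → Spec_normalize_type_name_py raw_type (normalize_type_name_py raw_type)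

-- ===== LEMMAS AND PROOFS =====

-- A's guarded rsplit step is plain takeWhile-on-the-reverse: when c does not occur,
-- takeWhile (· ≠ c) is the identity, so the guard is redundant.
theorem pvStep_eq (v : List Char) (c : Char) :
    (if PySem.Chars.isIn [c] v then pvRsplitLast v c else v)
      = (v.reverse.takeWhile (fun x => x ≠ c)).reverse := by
  by_cases h : c ∈ v
  · have : PySem.Chars.isIn [c] v = true := by
      rw [PySem.Chars.isIn_iff_infix, List.singleton_infix_iff]; exact h
    simp [this, pvRsplitLast]
  · have h1 : PySem.Chars.isIn [c] v = false := by
      rw [PySem.Chars.isIn_eq_false_iff, List.singleton_infix_iff]; exact h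
    have h2 : v.reverse.takeWhile (fun x => !decide (x = c)) = v.reverse := by
      rw [List.takeWhile_eq_self_iff]
      intro x hx
      simp only [Bool.not_eq_eq_eq_not, Bool.not_true, decide_eq_false_iff_not]
      rintro rfl
      exact h (List.mem_reverse.mp hx)
    simp [h1, h2]

-- B's per-character separator test is membership in the literal separator list.
theorem pvPredB_eq (ch : Char) :
    (!(PySem.Chars.isIn [ch] ['/', '#', ':'])) = decide (ch ≠ '/' ∧ ch ≠ '#' ∧ ch ≠ ':') := by
  by_cases h : ch ∈ ['/', '#', ':']
  · have : PySem.Chars.isIn [ch] ['/', '#', ':'] = true := by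
      rw [PySem.Chars.isIn_iff_infix, List.singleton_infix_iff]; exact h
    simp only [List.mem_cons, List.not_mem_nil, or_false] at h
    simp [this]
    tauto
  · have h1 : PySem.Chars.isIn [ch] ['/', '#', ':'] = false := by
      rw [PySem.Chars.isIn_eq_false_iff, List.singleton_infix_iff]; exact h
    simp only [List.mem_cons, List.not_mem_nil, or_false] at h
    push Not at h
    simp [h1, h]

-- three sequential suffix-after-last-separator passes = one combined reverse takeWhile
theorem pvCore (v : List Char) :
    ['/', '#', ':'].foldl
        (fun v sep => if PySem.Chars.isIn [sep] v then pvRsplitLast v sep else v) v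
      = (v.reverse.takeWhile (fun ch => !(PySem.Chars.isIn [ch] ['/', '#', ':']))).reverse := by
  simp only [List.foldl_cons, List.foldl_nil, pvStep_eq, List.reverse_reverse,
    List.takeWhile_takeWhile]
  congr 1
  congr 1
  funext x
  rw [pvPredB_eq]
  simp
  by_cases h1 : x = '/' <;> by_cases h2 : x = '#' <;> by_cases h3 : x = ':' <;> simp [h1, h2, h3]

-- ===== VERDICT (by name: the statement is the Claim_ definition above) =====
theorem normalize_type_name_py_spec : Claim_equal_normalize_type_name_py := by
  intro raw_type _
  unfold Spec_normalize_type_name_py normalize_type_name_py normalize_type_name_py_alt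
  simp only []
  by_cases h : PySem.Str.strip raw_type = ""
  · simp [h]
    decide
  · simp only [h, if_false]
    rw [pvCore]
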